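-- pv_equiv track=rewrite | github.com/ckadelka/MultistateGRN | multistate_toolbox.py | compare_attractors_basin_sizes
-- ===== SOURCE A (Python) =====
-- def compare_attractors_basin_sizes(attr_A, basin_A, attr_B, basin_B, key_separator_char = '→'):
--     # Define helper method to convert list of cyclically ordered integers into
--     # unique string representation regardless of phase shift in ordering
--     def __attr2key__(attr):
--         init = sorted(attr)[0]
--         bfor = ""
--         aftr = ""
--         flag = False
--         for nmbr in attr:
--             if nmbr == init:
--                 flag = True
--                 continue
--             if flag:
--                 aftr += str(nmbr) + key_separator_char
--             else:
--                 bfor += str(nmbr) + key_separator_char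
--         return (str(init) + key_separator_char + aftr + bfor)
--
--     attr_dict = dict()
--
--     attr_idx_A = dict()
--     attr_idx_B = dict()
--
--     basin_sizes_A = dict()
--     basin_sizes_B = dict()
--
--     # Get dictionary of all attractors within superset and
--     # respective indices in subsets A and B
--     for i, attr in enumerate(attr_A):
--         key = __attr2key__(attr)
--         attr_dict[key] = True
--         attr_idx_A[key] = i
--     for i, attr in enumerate(attr_B):
--         key = __attr2key__(attr)
--         attr_dict[key] = True
--         attr_idx_B[key] = i
--
--     for key in attr_dict.keys():
--         try:
--             basin_sizes_A[key] = basin_A[attr_idx_A[key]]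
--         except KeyError:
--             basin_sizes_A[key] = 0
--         try:
--             basin_sizes_B[key] = basin_B[attr_idx_B[key]]
--         except KeyError:
--             basin_sizes_B[key] = 0
--
--     return (basin_sizes_A, basin_sizes_B)
-- ===== SOURCE B (Python) =====
-- def compare_attractors_basin_sizes(attr_A, basin_A, attr_B, basin_B, key_separator_char = '→'):
--     # Canonical key: rotate the cycle to its first minimum (dropping the other
--     # occurrences of the minimum) and emit one 'str(x)+sep' chunk per element.
--     def __attr2key__(attr):
--         m = min(attr)
--         i = attr.index(m)
--         parts = [m] + [x for x in attr[i+1:] if x != m] + attr[:i]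
--         return ''.join(str(x) + key_separator_char for x in parts)
--
--     # One merged dict key -> (size_in_A, size_in_B), filled by streaming the A
--     # entries and then the B entries; insertion order is A-first-appearance then
--     # B-only keys, and a later duplicate key overwrites its own component.
--     merged = {}
--     for i, attr in enumerate(attr_A):
--         merged[__attr2key__(attr)] = (basin_A[i], 0)
--     for i, attr in enumerate(attr_B):
--         k = __attr2key__(attr)
--         a_size = merged[k][0] if k in merged else 0
--         merged[k] = (a_size, basin_B[i])
--
--     return ({k: v[0] for k, v in merged.items()},
--             {k: v[1] for k, v in merged.items()})
-- ===== Notes on version B (the rewrite author's own statement) =====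
-- stated objective: alternative
-- what changed: B replaces A's three intermediate dicts (attr_dict, attr_idx_A, attr_idx_B) and the try/except fill with a single merged dict mapping each canonical key to a (size_in_A, size_in_B) pair, filled in one streaming pass over the A entries then the B entries, from which the two result dicts are projected at the end; the key helper is recast from A's flag-driven two-accumulator loop into min/index/rotate emitting joined chunks.
import Mathlib
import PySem

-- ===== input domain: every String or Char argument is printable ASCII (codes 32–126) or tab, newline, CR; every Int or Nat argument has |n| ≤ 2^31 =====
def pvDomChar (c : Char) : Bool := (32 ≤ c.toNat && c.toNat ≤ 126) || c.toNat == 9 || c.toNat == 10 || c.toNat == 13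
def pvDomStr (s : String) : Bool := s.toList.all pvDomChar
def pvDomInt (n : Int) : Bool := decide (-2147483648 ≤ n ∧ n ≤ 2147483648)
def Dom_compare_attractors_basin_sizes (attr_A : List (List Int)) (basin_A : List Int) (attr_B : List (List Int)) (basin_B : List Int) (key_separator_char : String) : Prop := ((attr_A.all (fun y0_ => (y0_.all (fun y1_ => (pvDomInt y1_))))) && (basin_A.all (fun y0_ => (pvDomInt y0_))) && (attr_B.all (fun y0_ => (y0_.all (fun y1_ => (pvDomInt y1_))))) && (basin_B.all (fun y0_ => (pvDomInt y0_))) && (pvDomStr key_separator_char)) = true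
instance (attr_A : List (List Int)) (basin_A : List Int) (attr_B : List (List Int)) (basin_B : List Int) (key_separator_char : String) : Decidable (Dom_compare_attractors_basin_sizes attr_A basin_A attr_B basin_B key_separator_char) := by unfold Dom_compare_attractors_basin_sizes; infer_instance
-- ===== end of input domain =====

-- B replaces A's three intermediate dicts and try/except by ONE merged dict of
-- (size_in_A, size_in_B) pairs filled in a streaming pass over A-entries then
-- B-entries, projected into the two result dicts at the end; the key helper is
-- recast as min/index/rotate emitting chunks (objective: alternative).
-- Return value only; no argument is mutated.
-- Strings are built on List Char (Python's '+' on str is '++' on code points, exact)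
-- and packed with String.ofList.

-- ===== PORT A =====
def pvKeyA (sep : List Char) (attr : List Int) : List Char :=
  -- init = sorted(attr)[0]; the IndexError on attr = [] is excluded by Pre_
  let init : Int := (PySem.List.sorted attr (fun x => x) false).headD 0
  let st := attr.foldl (fun (st : List Char × List Char × Bool) nmbr =>
      if nmbr = init then (st.1, st.2.1, true)
      else if st.2.2 then (st.1, st.2.1 ++ PySem.Int.toChars nmbr ++ sep, st.2.2)
      else (st.1 ++ PySem.Int.toChars nmbr ++ sep, st.2.1, st.2.2)) ([], [], false)
  PySem.Int.toChars init ++ sep ++ st.2.1 ++ st.1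

-- the try/except block: basin[idx[key]], KeyError caught as 0 (the IndexError of
-- basin[i] itself is NOT caught in A; those inputs are excluded by Pre_)
def pvTryIdx (idx : PySem.Dict String Int) (basin : List Int) (key : String) : Int :=
  match idx.get? key with
  | some i => PySem.List.pyGetD basin i 0
  | none => 0

def compare_attractors_basin_sizes (attr_A : List (List Int)) (basin_A : List Int) (attr_B : List (List Int)) (basin_B : List Int) (key_separator_char : String) : (List (String × Int)) × (List (String × Int)) :=
  let sep := key_separator_char.toList
  let s1 := (PySem.List.enumerate attr_A 0).foldl
      (fun (st : PySem.Dict String Bool × PySem.Dict String Int) p =>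
        (st.1.insert (String.ofList (pvKeyA sep p.2)) true,
         st.2.insert (String.ofList (pvKeyA sep p.2)) p.1))
      (PySem.Dict.empty, PySem.Dict.empty)
  let s2 := (PySem.List.enumerate attr_B 0).foldl
      (fun (st : PySem.Dict String Bool × PySem.Dict String Int) p =>
        (st.1.insert (String.ofList (pvKeyA sep p.2)) true,
         st.2.insert (String.ofList (pvKeyA sep p.2)) p.1))
      (s1.1, PySem.Dict.empty)
  let outs := s2.1.keys.foldl
      (fun (o : PySem.Dict String Int × PySem.Dict String Int) key =>
        (o.1.insert key (pvTryIdx s1.2 basin_A key),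
         o.2.insert key (pvTryIdx s2.2 basin_B key)))
      (PySem.Dict.empty, PySem.Dict.empty)
  (outs.1.items, outs.2.items)

-- ===== PORT B =====
def pvKeyB (sep : List Char) (attr : List Int) : List Char :=
  -- m = min(attr); the ValueError on attr = [] is excluded by Pre_
  let m : Int := (PySem.List.min? attr (fun x => x)).getD 0
  let i : Nat := (PySem.List.index? attr m).getD 0
  let parts := m :: ((PySem.List.slice attr (some ((i : Int) + 1)) none).filter (fun x => decide (x ≠ m))
              ++ PySem.List.slice attr none (some (i : Int)))
  -- ''.join(str(x) + sep for x in parts)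
  (parts.map (fun n => PySem.Int.toChars n ++ sep)).flatten

-- merged[k][0] if k in merged else 0
def pvFst (d : PySem.Dict String (Int × Int)) (k : String) : Int :=
  match d.get? k with
  | some v => v.1
  | none => 0

def compare_attractors_basin_sizes_alt (attr_A : List (List Int)) (basin_A : List Int) (attr_B : List (List Int)) (basin_B : List Int) (key_separator_char : String) : (List (String × Int)) × (List (String × Int)) :=
  let sep := key_separator_char.toList
  let m1 : PySem.Dict String (Int × Int) :=
    (PySem.List.enumerate attr_A 0).foldl
      (fun d p => d.insert (String.ofList (pvKeyB sep p.2)) (PySem.List.pyGetD basin_A p.1 0, 0))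
      PySem.Dict.empty
  let merged : PySem.Dict String (Int × Int) :=
    (PySem.List.enumerate attr_B 0).foldl
      (fun d p =>
        d.insert (String.ofList (pvKeyB sep p.2))
          (pvFst d (String.ofList (pvKeyB sep p.2)), PySem.List.pyGetD basin_B p.1 0))
      m1
  (merged.items.map (fun kv => (kv.1, kv.2.1)), merged.items.map (fun kv => (kv.1, kv.2.2)))

-- ===== PRECONDITION & SPEC =====
-- Exactly where the Python A returns: every attractor nonempty (else sorted(attr)[0]
-- raises IndexError) and each basin list at least as long as its attractor list (else
-- the uncaught basin[idx] lookup raises IndexError: the key of the attractor at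
-- position len(basin) has a last-stored index ≥ len(basin)).
def Pre_compare_attractors_basin_sizes (attr_A : List (List Int)) (basin_A : List Int) (attr_B : List (List Int)) (basin_B : List Int) (key_separator_char : String) : Prop :=
  (∀ a ∈ attr_A, a ≠ []) ∧ (∀ a ∈ attr_B, a ≠ []) ∧
  attr_A.length ≤ basin_A.length ∧ attr_B.length ≤ basin_B.length
instance (attr_A : List (List Int)) (basin_A : List Int) (attr_B : List (List Int)) (basin_B : List Int) (key_separator_char : String) : Decidable (Pre_compare_attractors_basin_sizes attr_A basin_A attr_B basin_B key_separator_char) := by unfold Pre_compare_attractors_basin_sizes; infer_instance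

def pvWitness_compare_attractors_basin_sizes : List (List Int) × List Int × List (List Int) × List Int × String :=
  ([[1], [2, 1]], [3, 4], [[1, 2]], [5], "-")

def Spec_compare_attractors_basin_sizes (attr_A : List (List Int)) (basin_A : List Int) (attr_B : List (List Int)) (basin_B : List Int) (key_separator_char : String) (out : (List (String × Int)) × (List (String × Int))) : Prop := out = compare_attractors_basin_sizes_alt attr_A basin_A attr_B basin_B key_separator_char
instance (attr_A : List (List Int)) (basin_A : List Int) (attr_B : List (List Int)) (basin_B : List Int) (key_separator_char : String) (out : (List (String × Int)) × (List (String × Int))) : Decidable (Spec_compare_attractors_basin_sizes attr_A basin_A attr_B basin_B key_separator_char out) := by unfold Spec_compare_attractors_basin_sizes; infer_instance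

-- ===== CLAIM (what is proved, stated in full; the proofs are below) =====
def Claim_equal_compare_attractors_basin_sizes : Prop := ∀ (attr_A : List (List Int)) (basin_A : List Int) (attr_B : List (List Int)) (basin_B : List Int) (key_separator_char : String), Dom_compare_attractors_basin_sizes attr_A basin_A attr_B basin_B key_separator_char → Pre_compare_attractors_basin_sizes attr_A basin_A attr_B basin_B key_separator_char → Spec_compare_attractors_basin_sizes attr_A basin_A attr_B basin_B key_separator_char (compare_attractors_basin_sizes attr_A basin_A attr_B basin_B key_separator_char)

-- ===== LEMMAS AND PROOFS =====

theorem pvWitness_ok : Dom_compare_attractors_basin_sizes (pvWitness_compare_attractors_basin_sizes.1) (pvWitness_compare_attractors_basin_sizes.2.1) (pvWitness_compare_attractors_basin_sizes.2.2.1) (pvWitness_compare_attractors_basin_sizes.2.2.2.1) (pvWitness_compare_attractors_basin_sizes.2.2.2.2) ∧ Pre_compare_attractors_basin_sizes (pvWitness_compare_attractors_basin_sizes.1) (pvWitness_compare_attractors_basin_sizes.2.1) (pvWitness_compare_attractors_basin_sizes.2.2.1) (pvWitness_compare_attractors_basin_sizes.2.2.2.1) (pvWitness_compare_attractors_basin_sizes.2.2.2.2)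 := by
  constructor <;> decide

-- ''.join(str(x) + sep for x in l), on code points
def pvChunks (sep : List Char) (l : List Int) : List Char :=
  (l.map (fun n => PySem.Int.toChars n ++ sep)).flatten

-- the value both programs associate with key k for attractor list aX / basin list basin
def pvLookup (kf : List Int → String) (aX : List (List Int)) (basin : List Int) (k : String) : Int :=
  match (PySem.List.enumerate aX 0).reverse.find? (fun p => decide (kf p.2 = k)) with
  | some p => PySem.List.pyGetD basin p.1 0
  | none => 0

-- common normal form of both ports, parameterized by the key function
def pvNF (kf : List Int → String) (aA : List (List Int)) (bA : List Int) (aB : List (List Int)) (bB : List Int) : (List (String × Int)) × (List (String × Int)) :=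
  let K := PySem.Set.ofList (aA.map kf ++ aB.map kf)
  (K.map (fun k => (k, pvLookup kf aA bA k)), K.map (fun k => (k, pvLookup kf aB bB k)))

theorem foldl_pair_insert {α ν₁ ν₂ : Type} (key : α → String) (v1 : α → ν₁) (v2 : α → ν₂) :
    ∀ (l : List α) (st : PySem.Dict String ν₁ × PySem.Dict String ν₂),
      l.foldl (fun st x => (st.1.insert (key x) (v1 x), st.2.insert (key x) (v2 x))) st
        = (l.foldl (fun d x => d.insert (key x) (v1 x)) st.1,
           l.foldl (fun d x => d.insert (key x) (v2 x)) st.2) := by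
  intro l
  induction l with
  | nil => intro st; rfl
  | cons x xs ih => intro st; simpa using ih _

theorem get?_foldl_insert {α ν : Type} (key : α → String) (g : α → ν) :
    ∀ (l : List α) (d : PySem.Dict String ν) (k : String),
      (l.foldl (fun d x => d.insert (key x) (g x)) d).get? k
        = match l.reverse.find? (fun x => decide (key x = k)) with
          | some x => some (g x)
          | none => d.get? k := by
  intro l
  induction l with
  | nil => intro d k; rfl
  | cons x xs ih =>
    intro d k
    rw [List.foldl_cons, ih, List.reverse_cons, List.find?_append]
    cases h : xs.reverse.find? (fun x => decide (key x = k)) with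
    | some y => rfl
    | none =>
      by_cases hk : key x = k
      · simp [List.find?, hk]
      · simp [List.find?, hk, PySem.Dict.get?_insert, Ne.symm hk]

theorem find?_congr {α : Type} (p q : α → Bool) :
    ∀ (l : List α), (∀ x ∈ l, p x = q x) → l.find? p = l.find? q := by
  intro l
  induction l with
  | nil => intro _; rfl
  | cons x xs ih =>
    intro h
    rw [List.find?_cons, List.find?_cons, h x (List.mem_cons_self ..),
        ih (fun y hy => h y (List.mem_cons_of_mem _ hy))]

theorem map_key_enumerate {α : Type} (kf : α → String) (xs : List α) :
    (PySem.List.enumerate xs 0).map (fun p => kf p.2) = xs.map kf := by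
  have h1 : (fun (p : Int × α) => kf p.2) = kf ∘ (fun (p : Int × α) => p.2) := rfl
  rw [h1, ← List.map_map, PySem.List.map_snd_enumerate]

theorem items_foldl_insert_id {ν : Type} (v : String → ν) (K : List String) (hK : K.Nodup) :
    (K.foldl (fun d k => d.insert k (v k)) PySem.Dict.empty).items = K.map (fun k => (k, v k)) := by
  have h := PySem.Dict.items_foldl_insert_fresh (l := K) (k := fun a => a) (v := v)
      (d := PySem.Dict.empty) (fun a _ => PySem.Dict.contains_empty a)
      (by simpa using hK)
  simpa using h

theorem keys_two_folds (kf : List Int → String) (aA aB : List (List Int)) :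
    ((PySem.List.enumerate aB 0).foldl
        (fun d (p : Int × List Int) => d.insert (kf p.2) true)
      ((PySem.List.enumerate aA 0).foldl
        (fun d (p : Int × List Int) => d.insert (kf p.2) true)
        (PySem.Dict.empty : PySem.Dict String Bool))).keys
      = PySem.Set.ofList (aA.map kf ++ aB.map kf) := by
  rw [PySem.Dict.keys_foldl_insert_key _ (fun (p : Int × List Int) => kf p.2) (fun _ _ => true),
      PySem.Dict.keys_foldl_insert_key _ (fun (p : Int × List Int) => kf p.2) (fun _ _ => true),
      PySem.Dict.keys_empty, PySem.Set.update_nil_left, map_key_enumerate, map_key_enumerate,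
      ← PySem.Set.ofList_append]

theorem valA_gen (kf : List Int → String) (aX : List (List Int)) (basin : List Int) (k : String) :
    pvTryIdx ((PySem.List.enumerate aX 0).foldl
        (fun d (p : Int × List Int) => d.insert (kf p.2) p.1)
        (PySem.Dict.empty : PySem.Dict String Int)) basin k = pvLookup kf aX basin k := by
  unfold pvTryIdx pvLookup
  rw [get?_foldl_insert (fun (p : Int × List Int) => kf p.2) (fun (p : Int × List Int) => p.1)]
  cases (PySem.List.enumerate aX 0).reverse.find? (fun p => decide (kf p.2 = k)) with
  | some p => rfl
  | none => simp [PySem.Dict.get?_empty]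

theorem portA_eq (aA : List (List Int)) (bA : List Int) (aB : List (List Int)) (bB : List Int) (ks : String) :
    compare_attractors_basin_sizes aA bA aB bB ks
      = pvNF (fun a => String.ofList (pvKeyA ks.toList a)) aA bA aB bB := by
  unfold compare_attractors_basin_sizes pvNF
  dsimp only
  rw [foldl_pair_insert (fun (p : Int × List Int) => String.ofList (pvKeyA ks.toList p.2))
        (fun _ => true) (fun (p : Int × List Int) => p.1)]
  dsimp only
  rw [foldl_pair_insert (fun (p : Int × List Int) => String.ofList (pvKeyA ks.toList p.2))
        (fun _ => true) (fun (p : Int × List Int) => p.1)]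
  dsimp only
  rw [keys_two_folds (fun a => String.ofList (pvKeyA ks.toList a)) aA aB]
  have hnd : (PySem.Set.ofList (aA.map (fun a => String.ofList (pvKeyA ks.toList a))
      ++ aB.map (fun a => String.ofList (pvKeyA ks.toList a)))).Nodup :=
    PySem.Set.nodup_ofList _
  rw [foldl_pair_insert (fun (k : String) => k)]
  dsimp only
  rw [items_foldl_insert_id _ _ hnd, items_foldl_insert_id _ _ hnd]
  simp only [valA_gen (fun a => String.ofList (pvKeyA ks.toList a))]

-- ---- characterization of B's merged fold ----

-- replacing the state-dependent first component by its invariant value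
theorem fold2_replace (kf : List Int → String) (g : Int × List Int → Int) (vA : String → Int) :
    ∀ (l : List (Int × List Int)) (d : PySem.Dict String (Int × Int)),
      (∀ k, pvFst d k = vA k) →
      l.foldl (fun d p => d.insert (kf p.2) (pvFst d (kf p.2), g p)) d
        = l.foldl (fun d p => d.insert (kf p.2) (vA (kf p.2), g p)) d := by
  intro l
  induction l with
  | nil => intro d _; rfl
  | cons x xs ih =>
    intro d h
    rw [List.foldl_cons, List.foldl_cons, h (kf x.2)]
    apply ih
    intro k
    unfold pvFst
    rw [PySem.Dict.get?_insert]
    by_cases hk : k = kf x.2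
    · simp [hk]
    · simp only [hk, if_false]
      exact h k

theorem m1_fst (kf : List Int → String) (aA : List (List Int)) (bA : List Int) (k : String) :
    pvFst ((PySem.List.enumerate aA 0).foldl
        (fun d (p : Int × List Int) => d.insert (kf p.2) (PySem.List.pyGetD bA p.1 0, 0))
        PySem.Dict.empty) k = pvLookup kf aA bA k := by
  unfold pvFst pvLookup
  rw [get?_foldl_insert (fun (p : Int × List Int) => kf p.2)
        (fun (p : Int × List Int) => (PySem.List.pyGetD bA p.1 0, 0))]
  cases (PySem.List.enumerate aA 0).reverse.find? (fun p => decide (kf p.2 = k)) with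
  | some p => rfl
  | none => simp [PySem.Dict.get?_empty]

theorem merged_getD (kf : List Int → String) (aA : List (List Int)) (bA : List Int)
    (aB : List (List Int)) (bB : List Int) (k : String) :
    ((PySem.List.enumerate aB 0).foldl
        (fun d (p : Int × List Int) => d.insert (kf p.2) (pvLookup kf aA bA (kf p.2), PySem.List.pyGetD bB p.1 0))
      ((PySem.List.enumerate aA 0).foldl
        (fun d (p : Int × List Int) => d.insert (kf p.2) (PySem.List.pyGetD bA p.1 0, 0))
        PySem.Dict.empty)).getD k (0, 0)
      = (pvLookup kf aA bA k, pvLookup kf aB bB k) := by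
  rw [PySem.Dict.getD_eq_get?_getD,
      get?_foldl_insert (fun (p : Int × List Int) => kf p.2)
        (fun (p : Int × List Int) => (pvLookup kf aA bA (kf p.2), PySem.List.pyGetD bB p.1 0))]
  cases hB : (PySem.List.enumerate aB 0).reverse.find? (fun p => decide (kf p.2 = k)) with
  | some p =>
    have hk : kf p.2 = k := by
      have := List.find?_some hB
      simpa using this
    have h2 : pvLookup kf aB bB k = PySem.List.pyGetD bB p.1 0 := by
      unfold pvLookup; rw [hB]
    simp only [Option.getD_some]
    rw [hk, h2]
  | none =>
    have hvB : pvLookup kf aB bB k = 0 := by unfold pvLookup; rw [hB]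
    rw [get?_foldl_insert (fun (p : Int × List Int) => kf p.2)
          (fun (p : Int × List Int) => (PySem.List.pyGetD bA p.1 0, 0))]
    cases hA : (PySem.List.enumerate aA 0).reverse.find? (fun p => decide (kf p.2 = k)) with
    | some p =>
      have hvA : pvLookup kf aA bA k = PySem.List.pyGetD bA p.1 0 := by
        unfold pvLookup; rw [hA]
      simp only [Option.getD_some]
      rw [hvA, hvB]
    | none =>
      have hvA : pvLookup kf aA bA k = 0 := by unfold pvLookup; rw [hA]
      simp [PySem.Dict.get?_empty, hvA, hvB]

-- keys of B's two stacked folds, stated with B's concrete value functions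
theorem keys_two_folds_B (kf : List Int → String) (aA : List (List Int)) (bA : List Int)
    (aB : List (List Int)) (bB : List Int) :
    ((PySem.List.enumerate aB 0).foldl
        (fun d (p : Int × List Int) => d.insert (kf p.2) (pvLookup kf aA bA (kf p.2), PySem.List.pyGetD bB p.1 0))
      ((PySem.List.enumerate aA 0).foldl
        (fun d (p : Int × List Int) => d.insert (kf p.2) (PySem.List.pyGetD bA p.1 0, 0))
        PySem.Dict.empty)).keys
      = PySem.Set.ofList (aA.map kf ++ aB.map kf) := by
  rw [PySem.Dict.keys_foldl_insert_key _ (fun (p : Int × List Int) => kf p.2),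
      PySem.Dict.keys_foldl_insert_key _ (fun (p : Int × List Int) => kf p.2),
      PySem.Dict.keys_empty, PySem.Set.update_nil_left, map_key_enumerate, map_key_enumerate,
      ← PySem.Set.ofList_append]

theorem portB_eq (aA : List (List Int)) (bA : List Int) (aB : List (List Int)) (bB : List Int) (ks : String) :
    compare_attractors_basin_sizes_alt aA bA aB bB ks
      = pvNF (fun a => String.ofList (pvKeyB ks.toList a)) aA bA aB bB := by
  unfold compare_attractors_basin_sizes_alt pvNF
  dsimp only
  rw [fold2_replace (fun a => String.ofList (pvKeyB ks.toList a))
        (fun (p : Int × List Int) => PySem.List.pyGetD bB p.1 0)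
        (pvLookup (fun a => String.ofList (pvKeyB ks.toList a)) aA bA) _ _
        (m1_fst (fun a => String.ofList (pvKeyB ks.toList a)) aA bA)]
  have hkeys := keys_two_folds_B (fun a => String.ofList (pvKeyB ks.toList a)) aA bA aB bB
  have hnd : (PySem.Set.ofList (aA.map (fun a => String.ofList (pvKeyB ks.toList a))
      ++ aB.map (fun a => String.ofList (pvKeyB ks.toList a)))).Nodup :=
    PySem.Set.nodup_ofList _
  rw [PySem.Dict.items_eq_map_keys _ (by rw [hkeys]; exact hnd) (0, 0), hkeys]
  simp only [List.map_map, Function.comp_def,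
    merged_getD (fun a => String.ofList (pvKeyB ks.toList a)) aA bA aB bB]

-- ---- the two key helpers agree on nonempty attractors ----

theorem foldA_before (sep : List Char) (m : Int) :
    ∀ (l : List Int) (b : List Char), (∀ x ∈ l, x ≠ m) →
      l.foldl (fun (st : List Char × List Char × Bool) nmbr =>
          if nmbr = m then (st.1, st.2.1, true)
          else if st.2.2 then (st.1, st.2.1 ++ PySem.Int.toChars nmbr ++ sep, st.2.2)
          else (st.1 ++ PySem.Int.toChars nmbr ++ sep, st.2.1, st.2.2)) (b, [], false)
        = (b ++ pvChunks sep l, [], false) := by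
  intro l
  induction l with
  | nil => intro b _; simp [pvChunks]
  | cons x xs ih =>
    intro b hb
    have hx : ¬ (x = m) := hb x (List.mem_cons_self ..)
    rw [List.foldl_cons]
    simp only [hx, if_false, Bool.false_eq_true]
    rw [ih _ (fun y hy => hb y (List.mem_cons_of_mem _ hy))]
    simp [pvChunks, List.append_assoc]

theorem foldA_after (sep : List Char) (m : Int) :
    ∀ (l : List Int) (b a : List Char),
      l.foldl (fun (st : List Char × List Char × Bool) nmbr =>
          if nmbr = m then (st.1, st.2.1, true)
          else if st.2.2 then (st.1, st.2.1 ++ PySem.Int.toChars nmbr ++ sep, st.2.2)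
          else (st.1 ++ PySem.Int.toChars nmbr ++ sep, st.2.1, st.2.2)) (b, a, true)
        = (b, a ++ pvChunks sep (l.filter (fun x => decide (x ≠ m))), true) := by
  intro l
  induction l with
  | nil => intro b a; simp [pvChunks]
  | cons x xs ih =>
    intro b a
    rw [List.foldl_cons]
    by_cases hx : x = m
    · simp only [hx, if_true]
      rw [ih]
      simp
    · simp only [hx, if_false, ite_true]
      rw [ih]
      simp [pvChunks, hx, List.append_assoc]

theorem foldA_split (sep : List Char) (m : Int) (pre suf : List Int) (hpre : ∀ x ∈ pre, x ≠ m) :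
    (pre ++ m :: suf).foldl (fun (st : List Char × List Char × Bool) nmbr =>
        if nmbr = m then (st.1, st.2.1, true)
        else if st.2.2 then (st.1, st.2.1 ++ PySem.Int.toChars nmbr ++ sep, st.2.2)
        else (st.1 ++ PySem.Int.toChars nmbr ++ sep, st.2.1, st.2.2)) ([], [], false)
      = (pvChunks sep pre, pvChunks sep (suf.filter (fun x => decide (x ≠ m))), true) := by
  rw [List.foldl_append, foldA_before sep m pre [] hpre, List.foldl_cons]
  simp only [ite_true]
  rw [foldA_after]
  simp

theorem key_eq (sep : List Char) (attr : List Int) (h : attr ≠ []) :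
    pvKeyA sep attr = pvKeyB sep attr := by
  obtain ⟨m, hm⟩ : ∃ m, PySem.List.min? attr (fun x => x) = some m := by
    cases o : PySem.List.min? attr (fun x => x) with
    | none => exact absurd ((PySem.List.min?_eq_none_iff attr _).mp o) h
    | some m => exact ⟨m, rfl⟩
  have hmmem : m ∈ attr := PySem.List.min?_mem hm
  have hmin : ∀ y ∈ attr, m ≤ y := PySem.List.min?_isMin hm
  obtain ⟨hd, tl, hs⟩ : ∃ hd tl, PySem.List.sorted attr (fun x => x) false = hd :: tl := by
    cases s : PySem.List.sorted attr (fun x => x) false with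
    | nil => exact absurd ((PySem.List.sorted_eq_nil_iff attr _ false).mp s) h
    | cons hd tl => exact ⟨hd, tl, rfl⟩
  have hhd : hd = m := by
    have h1 : hd ≤ m := PySem.List.key_head_sorted_le attr (fun x => x) hs m hmmem
    have h2 : m ≤ hd := hmin hd ((PySem.List.mem_sorted attr _ false hd).mp (hs ▸ List.mem_cons_self ..))
    omega
  obtain ⟨i, hi⟩ : ∃ i, PySem.List.index? attr m = some i := by
    cases o : PySem.List.index? attr m with
    | none =>
      have hsm := (PySem.List.index?_isSome_iff attr m).mpr hmmem
      rw [o] at hsm; exact absurd hsm (by simp)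
    | some i => exact ⟨i, rfl⟩
  obtain ⟨pre, suf, hsplit, hlen, hnotmem⟩ := (PySem.List.index?_eq_some_iff attr m i).mp hi
  unfold pvKeyA pvKeyB
  dsimp only
  have hinit : (PySem.List.sorted attr (fun x => x) false).headD 0 = m := by
    rw [hs]; simp [hhd]
  have hm' : (PySem.List.min? attr (fun x => x)).getD 0 = m := by rw [hm]; rfl
  rw [hinit, hm']
  have hi' : (PySem.List.index? attr m).getD 0 = i := by rw [hi]; rfl
  rw [hi']
  have hcast : ((i : Int) + 1) = ((i + 1 : Nat) : Int) := by push_cast; ring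
  rw [hcast, PySem.List.slice_from_natCast, PySem.List.slice_to_natCast]
  have hdrop : attr.drop (i + 1) = suf := by
    rw [hsplit, ← hlen, show (pre ++ m :: suf) = (pre ++ [m]) ++ suf by simp,
        show pre.length + 1 = (pre ++ [m]).length by simp]
    exact List.drop_left
  have htake : attr.take i = pre := by
    rw [hsplit, ← hlen]
    exact List.take_left
  rw [hdrop, htake]
  conv_lhs => rw [hsplit]
  rw [foldA_split sep m pre suf (fun x hx hxm => hnotmem (hxm ▸ hx))]
  simp [pvChunks, List.append_assoc]

theorem pvNF_congr (kfA kfB : List Int → String)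
    (aA : List (List Int)) (bA : List Int) (aB : List (List Int)) (bB : List Int)
    (h1 : ∀ a ∈ aA, kfA a = kfB a) (h2 : ∀ a ∈ aB, kfA a = kfB a) :
    pvNF kfA aA bA aB bB = pvNF kfB aA bA aB bB := by
  have hlook : ∀ (aX : List (List Int)), (∀ a ∈ aX, kfA a = kfB a) → ∀ (basin : List Int) (k : String),
      pvLookup kfA aX basin k = pvLookup kfB aX basin k := by
    intro aX hX basin k
    unfold pvLookup
    have harg : ∀ p ∈ (PySem.List.enumerate aX 0).reverse,
        (fun (p : Int × List Int) => decide (kfA p.2 = k)) p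
          = (fun (p : Int × List Int) => decide (kfB p.2 = k)) p := by
      intro p hp
      have hmem : p.2 ∈ aX := by
        rw [List.mem_reverse] at hp
        obtain ⟨j, hj, hpeq⟩ := (PySem.List.mem_enumerate_iff aX 0 p).mp hp
        rw [hpeq]
        exact List.getElem_mem _
      dsimp only
      rw [hX p.2 hmem]
    rw [find?_congr _ _ _ harg]
  unfold pvNF
  dsimp only
  rw [List.map_congr_left h1, List.map_congr_left h2,
      show (fun k => (k, pvLookup kfA aA bA k)) = (fun k => (k, pvLookup kfB aA bA k)) from
        funext fun k => by rw [hlook aA h1 bA k],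
      show (fun k => (k, pvLookup kfA aB bB k)) = (fun k => (k, pvLookup kfB aB bB k)) from
        funext fun k => by rw [hlook aB h2 bB k]]

-- ===== VERDICT (by name: the statement is the Claim_ definition above) =====
theorem compare_attractors_basin_sizes_spec : Claim_equal_compare_attractors_basin_sizes := by
  intro aA bA aB bB ks _hdom hpre
  obtain ⟨hA, hB, -, -⟩ := hpre
  unfold Spec_compare_attractors_basin_sizes
  rw [portA_eq, portB_eq]
  exact pvNF_congr _ _ aA bA aB bB
    (fun a ha => by rw [key_eq ks.toList a (hA a ha)])
    (fun a ha => by rw [key_eq ks.toList a (hB a ha)])
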